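-- pv_equiv track=rewrite | github.com/raj713335/LeetCode | Easy/2549 Count Distinct Numbers on Board.py | distinctIntegers
-- ===== SOURCE A (Python) =====
-- def distinctIntegers(n: int) -> int:
--
--     count = 0
--
--     res = set()
--
--     if n == 1 or n == 2:
--
--         return 1
--
--     while n >= 2:
--
--         for i in range(n-1, 0, -1):
--
--             if n % i == 1:
--
--
--                 res.add(n)
--
--                 res.add(i)
--
--                 count += 1
--
--         n -= 1
--
--     return len(res)
-- ===== SOURCE B (Python) =====
-- def distinctIntegers(n: int) -> int:
--     return 1 if n == 1 else max(0, n - 1)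
-- ===== Notes on version B (the rewrite author's own statement) =====
-- stated objective: faster
-- what changed: Replaced the nested while/for loop that builds a set of all pairs (m, i) with m % i == 1 by the closed form max(0, n-1) (with the n == 1 special case), since the generated distinct numbers are exactly 2..n.
import Mathlib
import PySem

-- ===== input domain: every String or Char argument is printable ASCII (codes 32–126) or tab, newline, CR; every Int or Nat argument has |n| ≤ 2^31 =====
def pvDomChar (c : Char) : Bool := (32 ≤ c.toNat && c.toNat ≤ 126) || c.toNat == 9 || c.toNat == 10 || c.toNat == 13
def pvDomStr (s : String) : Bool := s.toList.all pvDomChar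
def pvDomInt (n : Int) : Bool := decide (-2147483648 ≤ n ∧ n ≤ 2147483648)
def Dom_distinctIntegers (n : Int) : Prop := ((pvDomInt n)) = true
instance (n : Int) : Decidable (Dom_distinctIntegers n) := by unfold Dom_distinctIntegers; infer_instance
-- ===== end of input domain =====

-- B replaces A's O(n^2) nested loops over a set by the closed form max(0, n-1) (asymptotically faster).
-- ===== PORT A =====
def pvInner (n : Int) (st : List Int × Int) (i : Int) : List Int × Int :=
  if PySem.Int.mod n i = 1 then (PySem.Set.add (PySem.Set.add st.1 n) i, st.2 + 1) else st

def pvALoop (n : Int) (res : List Int) (count : Int) : List Int × Int :=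
  if n ≥ 2 then
    let st := (PySem.List.pyRange (n - 1) 0 (-1)).foldl (pvInner n) (res, count)
    pvALoop (n - 1) st.1 st.2
  else (res, count)
termination_by n.toNat
decreasing_by omega

def distinctIntegers (n : Int) : Int :=
  if n = 1 ∨ n = 2 then 1
  else ((pvALoop n PySem.Set.empty 0).1.length : Int)

-- ===== PORT B =====
def distinctIntegers_alt (n : Int) : Int :=
  if n = 1 then 1 else max 0 (n - 1)

-- ===== PRECONDITION & SPEC =====
def Spec_distinctIntegers (n : Int) (out : Int) : Prop := out = distinctIntegers_alt n
instance (n : Int) (out : Int) : Decidable (Spec_distinctIntegers n out) := by unfold Spec_distinctIntegers; infer_instance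

-- ===== CLAIM (what is proved, stated in full; the proofs are below) =====
def Claim_equal_distinctIntegers : Prop := ∀ (n : Int), Dom_distinctIntegers n → Spec_distinctIntegers n (distinctIntegers n)

-- ===== LEMMAS AND PROOFS =====

lemma pvInner_mem (n : Int) (st : List Int × Int) (i x : Int) :
    x ∈ (pvInner n st i).1 ↔ x ∈ st.1 ∨ (PySem.Int.mod n i = 1 ∧ (x = n ∨ x = i)) := by
  unfold pvInner
  split_ifs with h
  · simp [PySem.Set.mem_add, h]; tauto
  · simp [h]

lemma pvFold_mem (n : Int) (L : List Int) :
    ∀ (res : List Int) (c : Int) (x : Int),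
      x ∈ (L.foldl (pvInner n) (res, c)).1 ↔
        x ∈ res ∨ ∃ i ∈ L, PySem.Int.mod n i = 1 ∧ (x = n ∨ x = i) := by
  induction L with
  | nil => simp
  | cons a L ih =>
    intro res c x
    simp only [List.foldl_cons]
    have : (pvInner n (res, c) a) = ((pvInner n (res, c) a).1, (pvInner n (res, c) a).2) := rfl
    rw [this, ih]
    rw [pvInner_mem]
    simp only [List.mem_cons]
    constructor
    · rintro ((h | ⟨h1, h2⟩) | ⟨i, hi, h1, h2⟩)
      · exact Or.inl h
      · exact Or.inr ⟨a, Or.inl rfl, h1, h2⟩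
      · exact Or.inr ⟨i, Or.inr hi, h1, h2⟩
    · rintro (h | ⟨i, (rfl | hi), h1, h2⟩)
      · exact Or.inl (Or.inl h)
      · exact Or.inl (Or.inr ⟨h1, h2⟩)
      · exact Or.inr ⟨i, hi, h1, h2⟩

lemma pvInner_nodup (n : Int) (st : List Int × Int) (i : Int) (h : st.1.Nodup) :
    (pvInner n st i).1.Nodup := by
  unfold pvInner
  split_ifs <;> simp [PySem.Set.nodup_add, PySem.Set.nodup_add _ _ h, h]

lemma pvFold_nodup (n : Int) (L : List Int) :
    ∀ (res : List Int) (c : Int), res.Nodup → (L.foldl (pvInner n) (res, c)).1.Nodup := by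
  induction L with
  | nil => intro res c h; simpa using h
  | cons a L ih =>
    intro res c h
    simp only [List.foldl_cons]
    have : (pvInner n (res, c) a) = ((pvInner n (res, c) a).1, (pvInner n (res, c) a).2) := rfl
    rw [this]
    exact ih _ _ (pvInner_nodup n (res, c) a h)

lemma pvMod_self_sub_one (n : Int) (h : 3 ≤ n) : PySem.Int.mod n (n - 1) = 1 := by
  rw [PySem.Int.mod_eq_emod_of_pos (show (0:Int) < n - 1 by omega)]
  have h2 : n % (n - 1) = (1 + (n - 1) * 1) % (n - 1) := by ring_nf
  rw [h2, Int.add_mul_emod_self_left]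
  exact Int.emod_eq_of_lt (by omega) (by omega)

lemma pvMod_one (n : Int) : PySem.Int.mod n 1 = 0 := by
  rw [PySem.Int.mod_eq_emod_of_pos (show (0:Int) < 1 by omega)]
  omega

lemma pvALoop_mem (n : Int) (res : List Int) (c : Int) :
    ∀ (x : Int),
      x ∈ (pvALoop n res c).1 ↔ x ∈ res ∨ (3 ≤ n ∧ 2 ≤ x ∧ x ≤ n) := by
  induction n, res, c using pvALoop.induct with
  | case1 n res c h st ih =>
    intro x
    rw [pvALoop]
    simp only [if_pos h]
    rw [ih, pvFold_mem]
    constructor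
    · rintro ((hr | ⟨i, hi, h1, h2⟩) | ⟨h3, h4, h5⟩)
      · exact Or.inl hr
      · rw [PySem.List.mem_pyRange_neg_one] at hi
        have hi2 : 2 ≤ i := by
          rcases lt_or_ge i 2 with hlt | hge
          · exfalso
            have : i = 1 := by omega
            rw [this, pvMod_one] at h1
            omega
          · exact hge
        rcases h2 with rfl | rfl <;> exact Or.inr ⟨by omega, by omega, by omega⟩
      · exact Or.inr ⟨by omega, h4, by omega⟩
    · rintro (hr | ⟨h3, h4, h5⟩)
      · exact Or.inl (Or.inl hr)
      · rcases eq_or_lt_of_le h5 with rfl | hlt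
        · refine Or.inl (Or.inr ⟨x - 1, ?_, pvMod_self_sub_one x h3, Or.inl rfl⟩)
          rw [PySem.List.mem_pyRange_neg_one]; omega
        · rcases eq_or_lt_of_le h3 with h3' | h3'
          · -- n = 3, x = 2
            refine Or.inl (Or.inr ⟨n - 1, ?_, pvMod_self_sub_one n h3, Or.inr (by omega)⟩)
            rw [PySem.List.mem_pyRange_neg_one]; omega
          · exact Or.inr ⟨by omega, h4, by omega⟩
  | case2 n res c h =>
    intro x
    rw [pvALoop]
    simp only [if_neg h]
    constructor
    · exact Or.inl
    · rintro (hr | ⟨h3, _, _⟩)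
      · exact hr
      · omega

lemma pvALoop_nodup (n : Int) (res : List Int) (c : Int) :
    res.Nodup → (pvALoop n res c).1.Nodup := by
  induction n, res, c using pvALoop.induct with
  | case1 n res c h st ih =>
    intro hr
    rw [pvALoop]
    simp only [if_pos h]
    exact ih (pvFold_nodup n _ res c hr)
  | case2 n res c h =>
    intro hr
    rw [pvALoop]
    simpa [if_neg h] using hr

lemma pvALoop_length (n : Int) (h : 3 ≤ n) :
    ((pvALoop n PySem.Set.empty 0).1.length : Int) = n - 1 := by
  set l := (pvALoop n PySem.Set.empty 0).1 with hl
  have hmem : ∀ x, x ∈ l ↔ 2 ≤ x ∧ x ≤ n := by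
    intro x
    rw [hl, pvALoop_mem]
    simp only [PySem.Set.empty]
    constructor
    · rintro (hx | ⟨_, h4, h5⟩)
      · simp at hx
      · exact ⟨h4, h5⟩
    · rintro ⟨h4, h5⟩
      exact Or.inr ⟨h, h4, h5⟩
  have hnd : l.Nodup := pvALoop_nodup n PySem.Set.empty 0 (by simp [PySem.Set.empty])
  have hfin : l.toFinset = Finset.Icc (2 : Int) n := by
    ext x
    simp [hmem x]
  have hcard : l.toFinset.card = l.length := List.toFinset_card_of_nodup hnd
  have : l.length = (n - 1).toNat := by
    rw [← hcard, hfin, Int.card_Icc]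
    congr 1
    omega
  rw [this]
  omega

lemma pvALoop_nil (n : Int) (h : n < 2) : (pvALoop n PySem.Set.empty 0).1 = [] := by
  have := pvALoop_mem n PySem.Set.empty 0
  rw [List.eq_nil_iff_forall_not_mem]
  intro x hx
  rw [this] at hx
  rcases hx with hx | ⟨h3, _, _⟩
  · simp [PySem.Set.empty] at hx
  · omega

-- ===== VERDICT (by name: the statement is the Claim_ definition above) =====
theorem distinctIntegers_spec : Claim_equal_distinctIntegers := by
  intro n _
  unfold Spec_distinctIntegers distinctIntegers distinctIntegers_alt
  rcases eq_or_ne n 1 with rfl | h1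
  · simp
  rcases eq_or_ne n 2 with rfl | h2
  · norm_num
  rcases lt_or_ge n 3 with hlt | hge
  · have hn2 : n < 2 := by omega
    rw [if_neg (by tauto), if_neg h1, pvALoop_nil n hn2]
    simp
    omega
  · rw [if_neg (by tauto), if_neg h1, pvALoop_length n hge]
    omega
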